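-- pv_equiv track=rewrite | github.com/mu-hashmi/flash-moe | benchmarks/train_eviction_model.py | compute_belady_oracle
-- ===== SOURCE A (Python) =====
-- from collections import defaultdict
--
-- def compute_belady_oracle(trace, cached_ids):
--     """Compute Belady optimal distances for each cached expert at each timestep.
--
--     For each timestep t and each cached expert e, find the next time e is
--     requested after t. If never requested again, distance = len(trace).
--
--     Args:
--         trace: list of sets (expert IDs requested at each token)
--         cached_ids: set of expert IDs in the cache
--
--     Returns list of dicts: [{expert_id: distance_to_next_use}, ...] per timestep.
--     """
--     T = len(trace)
--     # Precompute: for each expert, sorted list of timesteps where it appears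
--     appearances: dict[int, list[int]] = defaultdict(list)
--     for t, experts in enumerate(trace):
--         for eid in experts:
--             if eid in cached_ids:
--                 appearances[eid].append(t)
--
--     oracle = []
--     for t in range(T):
--         distances = {}
--         for eid in cached_ids:
--             apps = appearances[eid]
--             # Binary search for first appearance after t
--             lo, hi = 0, len(apps)
--             while lo < hi:
--                 mid = (lo + hi) // 2
--                 if apps[mid] <= t:
--                     lo = mid + 1
--                 else:
--                     hi = mid
--             if lo < len(apps):
--                 distances[eid] = apps[lo] - t
--             else:
--                 distances[eid] = T - t  # never used again
--         oracle.append(distances)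
--
--     return oracle
-- ===== SOURCE B (Python) =====
-- def compute_belady_oracle(trace, cached_ids):
--     """Belady distances via a single backward sweep: keep, per cached expert,
--     the index of its next appearance (T = never again) and update it walking
--     the trace from the end to the start."""
--     T = len(trace)
--     nxt = {eid: T for eid in cached_ids}
--     rev = []
--     for t, experts in reversed(list(enumerate(trace))):
--         rev.append({eid: nxt[eid] - t for eid in cached_ids})
--         for eid in experts:
--             if eid in nxt:
--                 nxt[eid] = t
--     rev.reverse()
--     return rev
-- ===== Notes on version B (the rewrite author's own statement) =====
-- stated objective: alternative
-- what changed: Replaces the per-timestep binary search over each expert's precomputed appearance lists with a single backward sweep that maintains, per cached expert, the index of its next appearance, emitting each timestep's distance dict from that map; intended to shave the log-factor, measured ~1.3-1.5x but not confirmed faster at the largest sizes, where per-row dict construction dominates both.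
import Mathlib
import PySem

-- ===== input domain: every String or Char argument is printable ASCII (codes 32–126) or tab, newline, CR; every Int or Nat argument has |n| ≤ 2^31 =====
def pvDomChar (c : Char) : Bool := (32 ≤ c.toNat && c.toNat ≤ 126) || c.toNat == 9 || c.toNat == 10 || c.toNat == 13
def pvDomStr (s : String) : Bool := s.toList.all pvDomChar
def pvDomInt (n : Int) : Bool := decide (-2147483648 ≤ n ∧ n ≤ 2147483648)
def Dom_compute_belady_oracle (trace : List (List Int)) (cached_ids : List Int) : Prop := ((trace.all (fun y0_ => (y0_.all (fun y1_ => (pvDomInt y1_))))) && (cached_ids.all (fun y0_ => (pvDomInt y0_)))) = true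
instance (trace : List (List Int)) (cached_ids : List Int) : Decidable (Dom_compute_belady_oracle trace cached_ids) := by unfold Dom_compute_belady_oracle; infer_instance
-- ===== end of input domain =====

-- B replaces A's per-timestep binary search over precomputed appearance lists by one
-- backward sweep maintaining each cached expert's next-appearance index (objective: alternative algorithm).


-- ===== PORT A =====
-- A's binary-search loop 'while lo < hi' (mid = (lo+hi)//2 is Nat division, exact for
-- the nonnegative lo, hi; apps[mid] is ported as getD — callers keep mid < hi ≤ apps.length,
-- so the index is always in range and getD is exact).
def pvA_bs (apps : List Int) (t : Int) (lo hi : Nat) : Nat :=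
  if lo < hi then
    if apps.getD ((lo + hi) / 2) 0 ≤ t then pvA_bs apps t ((lo + hi) / 2 + 1) hi
    else pvA_bs apps t lo ((lo + hi) / 2)
  else lo
termination_by hi - lo
decreasing_by all_goals omega

-- defaultdict(list) access 'appearances[eid]' is ported as getD eid [] (the defaultdict's
-- default; the key it silently inserts is never read again, so this is exact).
def compute_belady_oracle (trace : List (List Int)) (cached_ids : List Int) : List (List (Int × Int)) :=
  let T : Int := trace.length
  let appearances : PySem.Dict Int (List Int) :=
    (PySem.List.enumerate trace).foldl
      (fun d p => p.2.foldl
        (fun d eid => if cached_ids.contains eid then d.insert eid (d.getD eid [] ++ [p.1]) else d) d)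
      PySem.Dict.empty
  (PySem.List.pyRange 0 T 1).foldl
    (fun oracle t =>
      let distances : PySem.Dict Int Int :=
        cached_ids.foldl
          (fun dist eid =>
            let apps := appearances.getD eid []
            let lo := pvA_bs apps t 0 apps.length
            if lo < apps.length then dist.insert eid (apps.getD lo 0 - t)
            else dist.insert eid (T - t))
          PySem.Dict.empty
      oracle ++ [distances.items])
    []

-- ===== PORT B =====
-- 'nxt[eid]' in the row comprehension is ported as getD eid 0: every eid iterated over is a
-- key of nxt (initialised for all of cached_ids), so the lookup never raises and getD is exact.
def compute_belady_oracle_alt (trace : List (List Int)) (cached_ids : List Int) : List (List (Int × Int)) :=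
  let T : Int := trace.length
  let nxt0 : PySem.Dict Int Int := cached_ids.foldl (fun d eid => d.insert eid T) PySem.Dict.empty
  let res :=
    ((PySem.List.enumerate trace).reverse).foldl
      (fun (st : PySem.Dict Int Int × List (List (Int × Int))) p =>
        let row : PySem.Dict Int Int :=
          cached_ids.foldl (fun d eid => d.insert eid (st.1.getD eid 0 - p.1)) PySem.Dict.empty
        let nxt := p.2.foldl (fun d eid => if d.contains eid then d.insert eid p.1 else d) st.1
        (nxt, st.2 ++ [row.items]))
      (nxt0, ([] : List (List (Int × Int))))
  res.2.reverse

-- ===== PRECONDITION & SPEC =====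
def Spec_compute_belady_oracle (trace : List (List Int)) (cached_ids : List Int) (out : List (List (Int × Int))) : Prop := out = compute_belady_oracle_alt trace cached_ids
instance (trace : List (List Int)) (cached_ids : List Int) (out : List (List (Int × Int))) : Decidable (Spec_compute_belady_oracle trace cached_ids out) := by unfold Spec_compute_belady_oracle; infer_instance

-- ===== CLAIM (what is proved, stated in full; the proofs are below) =====
def Claim_equal_compute_belady_oracle : Prop := ∀ (trace : List (List Int)) (cached_ids : List Int), Dom_compute_belady_oracle trace cached_ids → Spec_compute_belady_oracle trace cached_ids (compute_belady_oracle trace cached_ids)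

-- ===== LEMMAS AND PROOFS =====

-- ---- common specification pieces ----
-- occurrence indices of e (one per copy) in a trace suffix starting at absolute index k
def pvOccs (e : Int) : List (List Int) → Int → List Int
  | [], _ => []
  | s :: rest, k => List.replicate (s.count e) k ++ pvOccs e rest (k + 1)

-- index of the first entry containing e, starting at absolute index k
def pvNf (e : Int) : List (List Int) → Int → Option Int
  | [], _ => none
  | s :: rest, k => if s.contains e then some k else pvNf e rest (k + 1)

-- the row emitted at timestep k, whose remaining suffix is rest
def pvRow (cached : List Int) (T : Int) (rest : List (List Int)) (k : Int) : List (Int × Int) :=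
  (cached.foldl (fun r eid => r.insert eid ((pvNf eid rest (k + 1)).getD T - k)) PySem.Dict.empty).items

def pvSpecRows (cached : List Int) (T : Int) : List (List Int) → Int → List (List (Int × Int))
  | [], _ => []
  | _ :: rest, k => pvRow cached T rest k :: pvSpecRows cached T rest (k + 1)

-- ---- B-side machinery ----
def pvNxt0 (cached : List Int) (T : Int) : PySem.Dict Int Int :=
  cached.foldl (fun d eid => d.insert eid T) PySem.Dict.empty

def pvUpd (k : Int) (s : List Int) (d : PySem.Dict Int Int) : PySem.Dict Int Int :=
  s.foldl (fun d eid => if d.contains eid then d.insert eid k else d) d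

def pvDA : List (List Int) → Int → PySem.Dict Int Int → PySem.Dict Int Int
  | [], _, d => d
  | s :: rest, k, d => pvUpd k s (pvDA rest (k + 1) d)

def pvRowsD (cached : List Int) : List (List Int) → Int → PySem.Dict Int Int → List (List (Int × Int))
  | [], _, _ => []
  | _ :: rest, k, d =>
      (cached.foldl (fun r eid => r.insert eid ((pvDA rest (k + 1) d).getD eid 0 - k)) PySem.Dict.empty).items
        :: pvRowsD cached rest (k + 1) d

lemma pvNxt0_get?_aux (cached : List Int) (T : Int) : ∀ (d : PySem.Dict Int Int) (e : Int),
    (cached.foldl (fun d eid => d.insert eid T) d).get? e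
      = if e ∈ cached then some T else d.get? e := by
  induction cached with
  | nil => simp
  | cons c rest ih =>
    intro d e
    simp only [List.foldl_cons, ih, List.mem_cons]
    by_cases he : e ∈ rest <;> by_cases hec : e = c <;>
      simp [he, hec, PySem.Dict.get?_insert]

lemma pvNxt0_get? (cached : List Int) (T : Int) (e : Int) :
    (pvNxt0 cached T).get? e = if e ∈ cached then some T else none := by
  simp [pvNxt0, pvNxt0_get?_aux]

lemma pvUpd_get? (s : List Int) (k : Int) : ∀ (d : PySem.Dict Int Int) (e : Int),
    (pvUpd k s d).get? e =
      if (d.get? e).isSome = true ∧ e ∈ s then some k else d.get? e := by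
  induction s with
  | nil => simp [pvUpd]
  | cons x rest ih =>
    intro d e
    simp only [pvUpd, List.foldl_cons] at *
    rw [ih, PySem.Dict.contains_eq_isSome_get?]
    by_cases hx : (d.get? x).isSome = true
    · simp only [hx, if_true]
      by_cases hex : e = x
      · subst hex
        simp [hx]
      · simp [PySem.Dict.get?_insert, hex, List.mem_cons]
    · simp only [hx]
      by_cases hex : e = x
      · subst hex
        simp [hx, List.mem_cons]
      · simp [List.mem_cons, hex]

lemma pvDA_get? (e : Int) : ∀ (l : List (List Int)) (k : Int) (d : PySem.Dict Int Int),
    (pvDA l k d).get? e =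
      match d.get? e with
      | none => none
      | some v => some ((pvNf e l k).getD v) := by
  intro l
  induction l with
  | nil => intro k d; cases h : d.get? e <;> simp [pvDA, pvNf, h]
  | cons s rest ih =>
    intro k d
    simp only [pvDA, pvUpd_get?, ih, pvNf]
    cases h : d.get? e with
    | none => simp
    | some v =>
      by_cases hs : s.contains e
      · have hm : e ∈ s := List.contains_iff_mem.mp hs
        simp [hm]
      · have hm : ¬ e ∈ s := fun hmem => hs (List.contains_iff_mem.mpr hmem)
        simp [hm]

lemma pvB_foldr (cached : List Int) : ∀ (l : List (List Int)) (k : Int) (d : PySem.Dict Int Int)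
    (acc : List (List (Int × Int))),
    (PySem.List.enumerate l k).foldr
      (fun p st =>
        (p.2.foldl (fun d eid => if d.contains eid then d.insert eid p.1 else d) st.1,
         st.2 ++ [(cached.foldl (fun d eid => d.insert eid (st.1.getD eid 0 - p.1)) PySem.Dict.empty).items]))
      (d, acc)
    = (pvDA l k d, acc ++ (pvRowsD cached l k d).reverse) := by
  intro l
  induction l with
  | nil => intro k d acc; simp [PySem.List.enumerate, pvDA, pvRowsD]
  | cons s rest ih =>
    intro k d acc
    rw [PySem.List.enumerate_cons, List.foldr_cons, ih]
    simp [pvDA, pvRowsD, pvUpd, List.append_assoc]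

lemma pvRowsD_eq_spec (cached : List Int) (T : Int) : ∀ (l : List (List Int)) (k : Int),
    pvRowsD cached l k (pvNxt0 cached T) = pvSpecRows cached T l k := by
  intro l
  induction l with
  | nil => intro k; simp [pvRowsD, pvSpecRows]
  | cons s rest ih =>
    intro k
    simp only [pvRowsD, pvSpecRows, ih, pvRow]
    congr 1
    congr 1
    apply PySem.List.foldl_congr_mem'
    intro e he acc
    have : (pvDA rest (k + 1) (pvNxt0 cached T)).getD e 0 = (pvNf e rest (k + 1)).getD T := by
      rw [PySem.Dict.getD_eq_get?_getD, pvDA_get?, pvNxt0_get?]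
      simp [he]
    rw [this]

lemma alt_eq (trace : List (List Int)) (cached : List Int) :
    compute_belady_oracle_alt trace cached = pvSpecRows cached trace.length trace 0 := by
  show (((PySem.List.enumerate trace).reverse.foldl
      (fun (st : PySem.Dict Int Int × List (List (Int × Int))) p =>
        (p.2.foldl (fun d eid => if d.contains eid then d.insert eid p.1 else d) st.1,
         st.2 ++ [(cached.foldl (fun d eid => d.insert eid (st.1.getD eid 0 - p.1)) PySem.Dict.empty).items]))
      (pvNxt0 cached trace.length, [])).2).reverse = _
  rw [List.foldl_reverse]
  rw [pvB_foldr cached trace 0 (pvNxt0 cached trace.length) []]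
  simp [pvRowsD_eq_spec]

-- ---- A-side machinery ----
def pvApp (trace : List (List Int)) (cached : List Int) : PySem.Dict Int (List Int) :=
  (PySem.List.enumerate trace).foldl
    (fun d p => p.2.foldl
      (fun d eid => if cached.contains eid then d.insert eid (d.getD eid [] ++ [p.1]) else d) d)
    PySem.Dict.empty

def pvRowA (trace : List (List Int)) (cached : List Int) (t : Int) : List (Int × Int) :=
  (cached.foldl
    (fun dist eid =>
      let apps := (pvApp trace cached).getD eid []
      let lo := pvA_bs apps t 0 apps.length
      if lo < apps.length then dist.insert eid (apps.getD lo 0 - t)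
      else dist.insert eid ((trace.length : Int) - t))
    PySem.Dict.empty).items

lemma pvInner_getD (cached : List Int) (t : Int) : ∀ (s : List Int) (d : PySem.Dict Int (List Int)) (e : Int),
    (s.foldl (fun d eid => if cached.contains eid then d.insert eid (d.getD eid [] ++ [t]) else d) d).getD e []
      = d.getD e [] ++ (if cached.contains e = true then List.replicate (s.count e) t else []) := by
  intro s
  induction s with
  | nil => intro d e; simp
  | cons x rest ih =>
    intro d e
    rw [List.foldl_cons, ih]
    by_cases hex : e = x
    · subst hex
      by_cases hc : e ∈ cached
      · simp [hc, List.replicate_succ]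
      · simp [hc]
    · have hxe : x ≠ e := fun h => hex h.symm
      by_cases hcx : x ∈ cached
      · simp [hcx, hxe, PySem.Dict.getD_insert, hex]
      · simp [hcx, hxe]

lemma pvApp_getD (cached : List Int) : ∀ (l : List (List Int)) (k : Int) (d : PySem.Dict Int (List Int)) (e : Int),
    cached.contains e = true →
    ((PySem.List.enumerate l k).foldl
      (fun d p => p.2.foldl
        (fun d eid => if cached.contains eid then d.insert eid (d.getD eid [] ++ [p.1]) else d) d)
      d).getD e []
    = d.getD e [] ++ pvOccs e l k := by
  intro l
  induction l with
  | nil => intro k d e _; simp [PySem.List.enumerate, pvOccs]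
  | cons s rest ih =>
    intro k d e hc
    have hm : e ∈ cached := List.contains_iff_mem.mp hc
    rw [PySem.List.enumerate_cons, List.foldl_cons, ih _ _ _ hc, pvInner_getD, pvOccs]
    simp [hm, List.append_assoc]

lemma pvOccs_bounds (e : Int) : ∀ (l : List (List Int)) (k x : Int),
    x ∈ pvOccs e l k → k ≤ x ∧ x < k + l.length := by
  intro l
  induction l with
  | nil => intro k x h; simp [pvOccs] at h
  | cons s rest ih =>
    intro k x h
    rw [pvOccs, List.mem_append] at h
    rcases h with h | h
    · have := List.eq_of_mem_replicate h
      subst this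
      refine ⟨le_refl _, ?_⟩
      simp only [List.length_cons]
      omega
    · have := ih (k + 1) x h
      simp only [List.length_cons]
      push_cast
      omega

lemma pvOccs_append (e : Int) : ∀ (l1 l2 : List (List Int)) (k : Int),
    pvOccs e (l1 ++ l2) k = pvOccs e l1 k ++ pvOccs e l2 (k + l1.length) := by
  intro l1
  induction l1 with
  | nil => intro l2 k; simp [pvOccs]
  | cons s rest ih =>
    intro l2 k
    rw [List.cons_append, pvOccs, pvOccs, ih, List.append_assoc]
    have harg : (k + 1) + (rest.length : Int) = k + ((s :: rest).length : Int) := by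
      simp
      ring
    rw [harg]

lemma pvOccs_head (e T : Int) : ∀ (l : List (List Int)) (k : Int),
    (pvOccs e l k).head?.getD T = (pvNf e l k).getD T := by
  intro l
  induction l with
  | nil => intro k; simp [pvOccs, pvNf]
  | cons s rest ih =>
    intro k
    by_cases hs : e ∈ s
    · have hpos : 0 < s.count e := List.count_pos_iff.mpr hs
      rcases Nat.exists_eq_succ_of_ne_zero (Nat.pos_iff_ne_zero.mp hpos) with ⟨n, hn⟩
      rw [pvOccs, pvNf]
      simp [hn, List.replicate_succ, hs]
    · have hz : s.count e = 0 := List.count_eq_zero.mpr hs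
      rw [pvOccs, pvNf]
      simp [hz, hs, ih]

lemma pvA_bs_spec (t : Int) : ∀ (n : Nat) (u v : List Int) (lo hi : Nat),
    hi - lo ≤ n → (∀ x ∈ u, x ≤ t) → (∀ x ∈ v, t < x) →
    lo ≤ u.length → u.length ≤ hi → hi ≤ u.length + v.length →
    pvA_bs (u ++ v) t lo hi = u.length := by
  intro n
  induction n with
  | zero =>
    intro u v lo hi hn hu hv hlo hhi hlen
    rw [pvA_bs]
    have hnlt : ¬ lo < hi := by omega
    simp [hnlt]
    omega
  | succ m ih =>
    intro u v lo hi hn hu hv hlo hhi hlen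
    rw [pvA_bs]
    by_cases hlt : lo < hi
    · simp only [hlt, if_true]
      set mid := (lo + hi) / 2 with hmid
      have hmlo : lo ≤ mid := by omega
      have hmhi : mid < hi := by omega
      by_cases hcase : mid < u.length
      · have hval : (u ++ v).getD mid 0 = u.getD mid 0 := List.getD_append u v 0 mid hcase
        have hle : u.getD mid 0 ≤ t := by
          rw [List.getD_eq_getElem u 0 hcase]
          exact hu _ (List.getElem_mem hcase)
        rw [hval]
        simp only [hle, if_true]
        exact ih u v (mid + 1) hi (by omega) hu hv (by omega) (by omega) hlen
      · have hul : u.length ≤ mid := by omega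
        have hmv : mid - u.length < v.length := by omega
        have hval : (u ++ v).getD mid 0 = v.getD (mid - u.length) 0 :=
          List.getD_append_right u v 0 mid hul
        have hvt : t < v.getD (mid - u.length) 0 := by
          rw [List.getD_eq_getElem v 0 hmv]
          exact hv _ (List.getElem_mem hmv)
        rw [hval]
        have hnle : ¬ v.getD (mid - u.length) 0 ≤ t := by omega
        simp only [hnle, if_false]
        exact ih u v lo mid (by omega) hu hv hlo (by omega) (by omega)
    · simp [hlt]
      omega

lemma pvRowA_eq (trace : List (List Int)) (cached : List Int) (k : Int) (rest : List (List Int))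
    (hk : 0 ≤ k) (hlt : k.toNat < trace.length)
    (hrest : rest = trace.drop (k.toNat + 1)) :
    pvRowA trace cached k = pvRow cached trace.length rest k := by
  unfold pvRowA pvRow
  congr 1
  apply PySem.List.foldl_congr_mem'
  intro e he acc
  have hc : cached.contains e = true := List.contains_iff_mem.mpr he
  -- the appearance list of e is pvOccs over the whole trace
  have happs : (pvApp trace cached).getD e [] = pvOccs e trace 0 := by
    have := pvApp_getD cached trace 0 PySem.Dict.empty e hc
    simpa [pvApp] using this
  -- split the trace at position k+1
  set m : Nat := k.toNat + 1 with hm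
  have hsplit : trace = trace.take m ++ rest := by
    rw [hrest, List.take_append_drop]
  have hlen_take : (trace.take m).length = m := by
    rw [List.length_take]
    omega
  set u : List Int := pvOccs e (trace.take m) 0 with hu
  set v : List Int := pvOccs e rest (k + 1) with hv
  have hocc : pvOccs e trace 0 = u ++ v := by
    conv_lhs => rw [hsplit]
    rw [pvOccs_append]
    congr 2
    rw [hlen_take]
    omega
  have hub : ∀ x ∈ u, x ≤ k := by
    intro x hx
    have := pvOccs_bounds e (trace.take m) 0 x hx
    rw [hlen_take] at this
    omega
  have hvb : ∀ x ∈ v, k < x := by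
    intro x hx
    have := pvOccs_bounds e rest (k + 1) x hx
    omega
  have hbs : pvA_bs (pvOccs e trace 0) k 0 (pvOccs e trace 0).length = u.length := by
    rw [hocc]
    exact pvA_bs_spec k (u ++ v).length u v 0 (u ++ v).length (by omega) hub hvb
      (by simp) (by simp) (by simp)
  rw [happs]
  show (if pvA_bs (pvOccs e trace 0) k 0 (pvOccs e trace 0).length < (pvOccs e trace 0).length
        then acc.insert e ((pvOccs e trace 0).getD (pvA_bs (pvOccs e trace 0) k 0 (pvOccs e trace 0).length) 0 - k)
        else acc.insert e ((trace.length : Int) - k))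
      = acc.insert e ((pvNf e rest (k + 1)).getD trace.length - k)
  rw [hbs]
  have hpush : (if u.length < (pvOccs e trace 0).length
        then acc.insert e ((pvOccs e trace 0).getD u.length 0 - k)
        else acc.insert e ((trace.length : Int) - k))
      = acc.insert e ((if u.length < (pvOccs e trace 0).length
          then (pvOccs e trace 0).getD u.length 0 else (trace.length : Int)) - k) := by
    split <;> rfl
  rw [hpush]
  congr 1
  congr 1
  rw [← pvOccs_head e trace.length rest (k + 1), ← hv, hocc]
  cases v with
  | nil => simp
  | cons x xs =>
    have hlt' : u.length < (u ++ x :: xs).length := by simp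
    simp only [hlt', if_true]
    rw [List.getD_append_right u (x :: xs) 0 u.length le_rfl]
    simp

lemma pvA_rows (trace : List (List Int)) (cached : List Int) : ∀ (l : List (List Int)) (k : Int),
    0 ≤ k → l = trace.drop k.toNat →
    (PySem.List.pyRange k trace.length 1).map (pvRowA trace cached) = pvSpecRows cached trace.length l k := by
  intro l
  induction l with
  | nil =>
    intro k hk hl
    have hlen : trace.length ≤ k.toNat := List.drop_eq_nil_iff.mp hl.symm
    rw [PySem.List.pyRange_one_eq_nil (by omega)]
    simp [pvSpecRows]
  | cons s rest ih =>
    intro k hk hl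
    have hlt : k.toNat < trace.length := by
      by_contra h
      rw [List.drop_eq_nil_iff.mpr (by omega)] at hl
      simp at hl
    have hrest : rest = trace.drop (k.toNat + 1) := by
      have hdd : trace.drop (k.toNat + 1) = (trace.drop k.toNat).drop 1 := by
        rw [List.drop_drop]
      rw [hdd, ← hl]
      simp
    rw [PySem.List.pyRange_one_cons (by omega), List.map_cons, pvSpecRows]
    congr 1
    · exact pvRowA_eq trace cached k rest hk hlt hrest
    · have hk1 : ((k + 1).toNat : Nat) = k.toNat + 1 := by omega
      exact ih (k + 1) (by omega) (by rw [hk1, hrest])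

lemma a_eq (trace : List (List Int)) (cached : List Int) :
    compute_belady_oracle trace cached
      = (PySem.List.pyRange 0 trace.length 1).map (pvRowA trace cached) := by
  show (PySem.List.pyRange 0 trace.length 1).foldl
      (fun oracle t => oracle ++ [pvRowA trace cached t]) [] = _
  rw [PySem.List.foldl_append_singleton_eq_map (fun t => pvRowA trace cached t)]
  simp

-- ===== VERDICT (by name: the statement is the Claim_ definition above) =====
theorem compute_belady_oracle_spec : Claim_equal_compute_belady_oracle := by
  intro trace cached _
  unfold Spec_compute_belady_oracle
  rw [a_eq, alt_eq, pvA_rows trace cached trace 0 le_rfl (by simp)]
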